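-- pv_equiv track=rewrite | github.com/Mihail544/Python_SoftUni | Functions - Exercise/Problem_12.py | factorial_division
-- ===== SOURCE A (Python) =====
-- def factorial_division(num1, num2):
--     def factorial(num):
--         result = 1
--         for n in range(1, num + 1):
--             result *= n
--         return result
--
--     factorial_num1 = factorial(num1)
--
--     factorial_num2 = factorial(num2)
--
--     return factorial_num1 // factorial_num2
-- ===== SOURCE B (Python) =====
-- def factorial_division(num1, num2):
--     a = max(num1, 0)
--     b = max(num2, 0)
--     if a >= b:
--         result = 1
--         for n in range(b + 1, a + 1):
--             result *= n
--         return result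
--     denom = 1
--     for n in range(a + 1, b + 1):
--         denom *= n
--     return 1 // denom
-- ===== Notes on version B (the rewrite author's own statement) =====
-- stated objective: faster
-- what changed: Instead of computing both full factorials and dividing, B multiplies only the integers strictly between the two (clamped) arguments, giving the quotient directly when num1 >= num2 and 1 // denominator otherwise; intended as faster (O(|num1-num2|) multiplications vs O(num1+num2)); measured 20x at the largest size both finished.
import Mathlib
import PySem

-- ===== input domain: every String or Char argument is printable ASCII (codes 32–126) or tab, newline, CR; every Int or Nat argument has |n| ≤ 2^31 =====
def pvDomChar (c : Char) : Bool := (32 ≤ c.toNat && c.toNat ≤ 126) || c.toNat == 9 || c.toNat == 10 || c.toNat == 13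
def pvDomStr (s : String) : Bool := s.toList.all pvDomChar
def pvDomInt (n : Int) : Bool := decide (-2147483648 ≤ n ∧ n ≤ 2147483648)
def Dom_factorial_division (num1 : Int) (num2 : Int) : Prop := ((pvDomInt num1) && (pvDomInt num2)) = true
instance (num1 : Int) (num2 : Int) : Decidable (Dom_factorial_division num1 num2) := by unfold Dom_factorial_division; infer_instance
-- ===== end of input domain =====

-- B multiplies only the integers strictly between the two (clamped) arguments instead of
-- computing both full factorials and dividing; intended as faster (measured 20x at the largest size both finished), same exact value.

-- ===== PORT A =====
-- inner helper 'factorial': result = 1; for n in range(1, num+1): result *= n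
def pvFactA (num : Int) : Int :=
  (PySem.List.pyRange 1 (num + 1) 1).foldl (· * ·) 1

def factorial_division (num1 : Int) (num2 : Int) : Int :=
  PySem.Int.floordiv (pvFactA num1) (pvFactA num2)

-- ===== PORT B =====
def factorial_division_alt (num1 : Int) (num2 : Int) : Int :=
  let a := max num1 0
  let b := max num2 0
  if a ≥ b then
    (PySem.List.pyRange (b + 1) (a + 1) 1).foldl (· * ·) 1
  else
    PySem.Int.floordiv 1 ((PySem.List.pyRange (a + 1) (b + 1) 1).foldl (· * ·) 1)

-- ===== PRECONDITION & SPEC =====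
def Spec_factorial_division (num1 : Int) (num2 : Int) (out : Int) : Prop := out = factorial_division_alt num1 num2
instance (num1 : Int) (num2 : Int) (out : Int) : Decidable (Spec_factorial_division num1 num2 out) := by unfold Spec_factorial_division; infer_instance

-- ===== CLAIM (what is proved, stated in full; the proofs are below) =====
def Claim_equal_factorial_division : Prop := ∀ (num1 : Int) (num2 : Int), Dom_factorial_division num1 num2 → Spec_factorial_division num1 num2 (factorial_division num1 num2)

-- ===== LEMMAS AND PROOFS =====

theorem pv_foldl_mul_eq_prod (l : List Int) : l.foldl (· * ·) 1 = l.prod :=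
  List.prod_eq_foldl.symm

-- product of range(lo, hi) is positive when lo ≥ 1
theorem pv_prod_pyRange_pos (lo hi : Int) (h : 1 ≤ lo) :
    0 < (PySem.List.pyRange lo hi 1).prod := by
  apply List.prod_pos
  intro x hx
  have := (PySem.List.mem_pyRange_one.mp hx).1
  omega

-- split a product of a range at any midpoint
theorem pv_prod_pyRange_split (lo m hi : Int) (h1 : lo ≤ m) (h2 : m ≤ hi) :
    (PySem.List.pyRange lo hi 1).prod =
      (PySem.List.pyRange lo m 1).prod * (PySem.List.pyRange m hi 1).prod := by
  rw [PySem.List.pyRange_one_append lo m hi h1 h2, List.prod_append]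

-- A's factorial clamps negatives to 1 (empty range): fact n = prod(range(1, max n 0 + 1))
theorem pvFactA_eq (n : Int) : pvFactA n = (PySem.List.pyRange 1 (max n 0 + 1) 1).prod := by
  unfold pvFactA
  rw [pv_foldl_mul_eq_prod]
  rcases le_or_gt n 0 with h | h
  · rw [PySem.List.pyRange_one_eq_nil (by omega), PySem.List.pyRange_one_eq_nil (by omega)]
  · have : max n 0 = n := by omega
    rw [this]

-- exact division: (d*q) // d = q for d > 0
theorem pv_floordiv_mul_cancel (d q : Int) (hd : 0 < d) :
    PySem.Int.floordiv (d * q) d = q := by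
  rw [PySem.Int.floordiv_eq_iff_of_pos hd]
  constructor <;> nlinarith

-- f // (f*q) = 1 // q for f > 0, q > 0
theorem pv_floordiv_self_mul (f q : Int) (hf : 0 < f) (hq : 0 < q) :
    PySem.Int.floordiv f (f * q) = PySem.Int.floordiv 1 q := by
  rcases eq_or_lt_of_le ((by omega : (1:Int) ≤ q)) with h1 | h2
  · rw [← h1, mul_one]
    have e1 : PySem.Int.floordiv f f = 1 := by
      rw [PySem.Int.floordiv_eq_iff_of_pos hf]; constructor <;> nlinarith
    have e2 : PySem.Int.floordiv (1 : Int) 1 = 1 := by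
      rw [PySem.Int.floordiv_eq_iff_of_pos (by omega : (0:Int) < 1)]; omega
    rw [e1, e2]
  · have hfq : 0 < f * q := by positivity
    have e1 : PySem.Int.floordiv f (f * q) = 0 := by
      rw [PySem.Int.floordiv_eq_iff_of_pos hfq]; constructor <;> nlinarith
    have e2 : PySem.Int.floordiv (1 : Int) q = 0 := by
      rw [PySem.Int.floordiv_eq_iff_of_pos hq]; constructor <;> nlinarith
    rw [e1, e2]

-- ===== VERDICT (by name: the statement is the Claim_ definition above) =====
theorem factorial_division_spec : Claim_equal_factorial_division := by
  intro num1 num2 _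
  unfold Spec_factorial_division factorial_division factorial_division_alt
  rw [pvFactA_eq, pvFactA_eq]
  set a := max num1 0 with ha
  set b := max num2 0 with hb
  have ha0 : 0 ≤ a := le_max_right _ _
  have hb0 : 0 ≤ b := le_max_right _ _
  simp only [ge_iff_le]
  split_ifs with hab
  · -- b ≤ a : fact a = fact b * prod(b+1..a+1), exact division
    rw [pv_prod_pyRange_split 1 (b + 1) (a + 1) (by omega) (by omega),
        pv_foldl_mul_eq_prod,
        pv_floordiv_mul_cancel _ _ (pv_prod_pyRange_pos 1 (b + 1) le_rfl)]
  · -- a < b : fact b = fact a * q ;  f // (f*q) = 1 // q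
    push Not at hab
    rw [pv_prod_pyRange_split 1 (a + 1) (b + 1) (by omega) (by omega),
        pv_foldl_mul_eq_prod,
        pv_floordiv_self_mul _ _ (pv_prod_pyRange_pos 1 (a + 1) le_rfl)
          (pv_prod_pyRange_pos (a + 1) (b + 1) (by omega))]
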